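-- pv_equiv track=rewrite | github.com/jacobtie/datasets_visualization_eda | utility.py | reduceByKey
-- ===== SOURCE A (Python) =====
-- def reduceByKey(arr):
--     res = []
--     for val in arr:
--         found = False
--         for i,r in enumerate(res):
--             if r[0] == val:
--                 r[1] += 1
--                 found = True
--                 break
--         if not found:
--             res.append([val, 1])
--     return res
-- ===== SOURCE B (Python) =====
-- def reduceByKey(arr):
--     seen = []
--     for val in arr:
--         if val not in seen:
--             seen.append(val)
--     return [[v, arr.count(v)] for v in seen]
-- ===== Notes on version B (the rewrite author's own statement) =====
-- stated objective: alternative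
-- what changed: Replaces A's single interleaved pass that searches and increments counts in the growing result with a two-phase strategy: first collect distinct values in first-seen order, then count each with list.count over the whole input.
import Mathlib
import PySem

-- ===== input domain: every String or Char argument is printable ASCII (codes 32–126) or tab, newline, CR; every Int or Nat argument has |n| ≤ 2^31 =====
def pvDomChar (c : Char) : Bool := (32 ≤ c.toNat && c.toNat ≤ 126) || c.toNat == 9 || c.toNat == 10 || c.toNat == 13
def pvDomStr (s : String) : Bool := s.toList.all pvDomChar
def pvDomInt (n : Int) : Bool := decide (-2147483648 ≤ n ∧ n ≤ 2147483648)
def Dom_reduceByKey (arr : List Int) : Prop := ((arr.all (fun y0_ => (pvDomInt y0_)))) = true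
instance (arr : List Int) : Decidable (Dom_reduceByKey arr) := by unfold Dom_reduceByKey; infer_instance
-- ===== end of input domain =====

-- B collects the distinct values first and then counts each with a full scan,
-- instead of A's single pass that searches the growing result and increments in place.

-- ===== PORT A =====
-- inner 'for i,r in enumerate(res): if r[0] == val: r[1] += 1; break' + the
-- not-found append; r[0]/r[1] read/written via getD/set, exact since every
-- entry of res is a 2-element list [value, count].
def pvBump (v : Int) : List (List Int) → List (List Int)
  | [] => [[v, 1]]
  | r :: rest =>
      if r.getD 0 0 = v then r.set 1 (r.getD 1 0 + 1) :: rest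
      else r :: pvBump v rest

def reduceByKey (arr : List Int) : List (List Int) :=
  arr.foldl (fun res v => pvBump v res) []

-- ===== PORT B =====
def reduceByKey_alt (arr : List Int) : List (List Int) :=
  (arr.foldl (fun seen v => if v ∈ seen then seen else seen ++ [v]) []).map
    (fun v => [v, (arr.count v : Int)])

-- ===== PRECONDITION & SPEC =====
def Spec_reduceByKey (arr : List Int) (out : List (List Int)) : Prop := out = reduceByKey_alt arr
instance (arr : List Int) (out : List (List Int)) : Decidable (Spec_reduceByKey arr out) := by unfold Spec_reduceByKey; infer_instance

-- ===== CLAIM (what is proved, stated in full; the proofs are below) =====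
def Claim_equal_reduceByKey : Prop := ∀ (arr : List Int), Dom_reduceByKey arr → Spec_reduceByKey arr (reduceByKey arr)

-- ===== LEMMAS AND PROOFS =====

/-- B's first phase as a function of the processed prefix. -/
def pvSeen (p : List Int) : List Int :=
  p.foldl (fun seen v => if v ∈ seen then seen else seen ++ [v]) []

theorem pvSeen_mem_fold (p : List Int) : ∀ (s : List Int) (w : Int),
    (w ∈ p.foldl (fun seen v => if v ∈ seen then seen else seen ++ [v]) s) ↔ (w ∈ s ∨ w ∈ p) := by
  induction p with
  | nil => simp
  | cons v rest ih =>
      intro s w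
      simp only [List.foldl_cons]
      by_cases hv : v ∈ s
      · simp [hv, ih]
        constructor
        · rintro (h | h) <;> tauto
        · rintro (h | h | h)
          · tauto
          · subst h; tauto
          · tauto
      · simp [hv, ih]
        constructor
        · rintro ((h | h) | h) <;> tauto
        · rintro (h | h | h) <;> tauto

theorem pvSeen_mem (p : List Int) (w : Int) : w ∈ pvSeen p ↔ w ∈ p := by
  simpa using pvSeen_mem_fold p [] w

theorem pvSeen_nodup_fold (p : List Int) : ∀ (s : List Int), s.Nodup →
    (p.foldl (fun seen v => if v ∈ seen then seen else seen ++ [v]) s).Nodup := by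
  induction p with
  | nil => intro s hs; simpa using hs
  | cons v rest ih =>
      intro s hs
      simp only [List.foldl_cons]
      by_cases hv : v ∈ s
      · simpa [hv] using ih s hs
      · have : (s ++ [v]).Nodup := by
          simp [List.nodup_append, hs]
          exact fun a ha h => hv (h ▸ ha)
        simpa [hv] using ih _ this

theorem pvSeen_nodup (p : List Int) : (pvSeen p).Nodup := pvSeen_nodup_fold p [] (by simp)

theorem pvSeen_append_singleton (p : List Int) (v : Int) :
    pvSeen (p ++ [v]) = if v ∈ pvSeen p then pvSeen p else pvSeen p ++ [v] := by
  simp [pvSeen, List.foldl_append]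

/-- bump on a mapped distinct list when the value is present: increment its count. -/
theorem pvBump_mem (c : Int → Int) (v : Int) :
    ∀ (seen : List Int), seen.Nodup → v ∈ seen →
    pvBump v (seen.map (fun w => [w, c w]))
      = seen.map (fun w => [w, if w = v then c w + 1 else c w]) := by
  intro seen
  induction seen with
  | nil => simp
  | cons w rest ih =>
      intro hnd hv
      simp only [List.map_cons, pvBump]
      by_cases hw : w = v
      · subst hw
        have hnot : w ∉ rest := (List.nodup_cons.mp hnd).1
        simp only [List.getD, List.getElem?_cons_zero, Option.getD_some, if_pos rfl]
        have : rest.map (fun x => [x, if x = w then c x + 1 else c x])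
            = rest.map (fun x => [x, c x]) := by
          apply List.map_congr_left
          intro x hx
          have : x ≠ w := fun h => hnot (h ▸ hx)
          simp [this]
        simp [this, List.set]
      · have hv' : v ∈ rest := by
          rcases List.mem_cons.mp hv with h | h
          · exact absurd h.symm hw
          · exact h
        have hnd' : rest.Nodup := (List.nodup_cons.mp hnd).2
        simp only [List.getD, List.getElem?_cons_zero, Option.getD_some]
        rw [if_neg hw, ih hnd' hv']
        simp [hw]

/-- bump on a mapped list when the value is absent: append [v, 1]. -/
theorem pvBump_not_mem (c : Int → Int) (v : Int) :
    ∀ (seen : List Int), v ∉ seen →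
    pvBump v (seen.map (fun w => [w, c w])) = seen.map (fun w => [w, c w]) ++ [[v, 1]] := by
  intro seen
  induction seen with
  | nil => simp [pvBump]
  | cons w rest ih =>
      intro hv
      have hw : w ≠ v := fun h => hv (by simp [h])
      have hv' : v ∉ rest := fun h => hv (List.mem_cons_of_mem _ h)
      simp only [List.map_cons, pvBump, List.getD, List.getElem?_cons_zero, Option.getD_some]
      rw [if_neg hw, ih hv']
      simp

/-- A's state after a prefix p equals B's table for that prefix. -/
theorem pvInvariant : ∀ (rest p : List Int),
    rest.foldl (fun res v => pvBump v res)
        ((pvSeen p).map (fun w => [w, (p.count w : Int)]))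
      = (pvSeen (p ++ rest)).map (fun w => [w, ((p ++ rest).count w : Int)]) := by
  intro rest
  induction rest with
  | nil => intro p; simp
  | cons v rest' ih =>
      intro p
      simp only [List.foldl_cons]
      have hstep : pvBump v ((pvSeen p).map (fun w => [w, (p.count w : Int)]))
          = (pvSeen (p ++ [v])).map (fun w => [w, ((p ++ [v]).count w : Int)]) := by
        by_cases hv : v ∈ pvSeen p
        · rw [pvBump_mem _ _ _ (pvSeen_nodup p) hv, pvSeen_append_singleton, if_pos hv]
          apply List.map_congr_left
          intro w _
          by_cases hw : w = v
          · simp [hw, List.count_append]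
          · simp [hw, Ne.symm hw, List.count_append]
        · rw [pvBump_not_mem _ _ _ hv, pvSeen_append_singleton, if_neg hv]
          have hvp : v ∉ p := fun h => hv ((pvSeen_mem p v).mpr h)
          rw [List.map_append]
          congr 1
          · apply List.map_congr_left
            intro w hw
            have hwv : w ≠ v := fun h => hv (h ▸ hw)
            simp [List.count_append, Ne.symm hwv]
          · simp [List.count_append, List.count_singleton, List.count_eq_zero.mpr hvp]
      rw [hstep]
      have := ih (p ++ [v])
      simpa using this

-- ===== VERDICT (by name: the statement is the Claim_ definition above) =====
theorem reduceByKey_spec : Claim_equal_reduceByKey := by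
  intro arr _
  unfold Spec_reduceByKey reduceByKey reduceByKey_alt
  have := pvInvariant arr []
  simpa [pvSeen] using this
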